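-- pv_equiv track=rewrite | github.com/jonahshader/steam_game_embedding | data_to_custom_vec.py | many_hot_encode
-- ===== SOURCE A (Python) =====
-- def many_hot_encode(values, all_values):
--     vec = []
--     for value in all_values:
--         if value in values:
--             vec.append(1)
--         else:
--             vec.append(0)
--     return vec
-- ===== SOURCE B (Python) =====
-- def many_hot_encode(values, all_values):
--     index = {}
--     for i, v in enumerate(all_values):
--         index.setdefault(v, []).append(i)
--     vec = [0] * len(all_values)
--     for value in values:
--         for pos in index.get(value, []):
--             vec[pos] = 1
--     return vec
-- ===== Notes on version B (the rewrite author's own statement) =====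
-- stated objective: faster
-- what changed: Replaces the scan of all_values with a linear membership test per element by a prebuilt position index over all_values: B iterates over values and marks the recorded positions in a zero vector.
import Mathlib
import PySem

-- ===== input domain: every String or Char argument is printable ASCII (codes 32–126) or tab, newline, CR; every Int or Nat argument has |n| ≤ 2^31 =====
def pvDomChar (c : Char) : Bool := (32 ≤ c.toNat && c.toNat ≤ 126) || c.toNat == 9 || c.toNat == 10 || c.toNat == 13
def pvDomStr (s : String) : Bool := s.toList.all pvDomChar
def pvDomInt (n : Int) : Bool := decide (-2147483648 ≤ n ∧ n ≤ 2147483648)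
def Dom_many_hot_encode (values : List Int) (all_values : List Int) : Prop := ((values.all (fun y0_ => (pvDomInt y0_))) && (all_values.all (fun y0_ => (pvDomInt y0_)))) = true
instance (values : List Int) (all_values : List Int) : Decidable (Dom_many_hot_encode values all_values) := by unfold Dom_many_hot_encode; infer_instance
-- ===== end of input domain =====

-- B replaces A's per-element membership scan of values by a prebuilt value→positions
-- index and a single marking pass over values (objective: faster).

-- ===== PORT A =====
-- vec = []; for value in all_values: append 1 if value in values else 0
def many_hot_encode (values : List Int) (all_values : List Int) : List Int :=
  all_values.foldl (fun vec value => if value ∈ values then vec ++ [1] else vec ++ [0]) []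

-- ===== PORT B =====
-- index = {}; for i, v in enumerate(all_values): index.setdefault(v, []).append(i)
-- vec = [0] * len(all_values); for value in values: for pos in index.get(value, []): vec[pos] = 1
def many_hot_encode_alt (values : List Int) (all_values : List Int) : List Int :=
  let index : PySem.Dict Int (List Int) :=
    (PySem.List.enumerate all_values).foldl (fun d p => d.modify p.2 [] (· ++ [p.1])) PySem.Dict.empty
  let vec : List Int := List.replicate all_values.length 0
  values.foldl (fun vec v => (index.getD v []).foldl (fun vec pos => PySem.List.pySetD vec pos 1) vec) vec

-- ===== PRECONDITION & SPEC =====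
def Spec_many_hot_encode (values : List Int) (all_values : List Int) (out : List Int) : Prop := out = many_hot_encode_alt values all_values
instance (values : List Int) (all_values : List Int) (out : List Int) : Decidable (Spec_many_hot_encode values all_values out) := by unfold Spec_many_hot_encode; infer_instance

-- ===== CLAIM (what is proved, stated in full; the proofs are below) =====
def Claim_equal_many_hot_encode : Prop := ∀ (values : List Int) (all_values : List Int), Dom_many_hot_encode values all_values → Spec_many_hot_encode values all_values (many_hot_encode values all_values)

-- ===== LEMMAS AND PROOFS =====

-- A's loop appends one bit per element of all_values.
theorem mhA_eq_map (values : List Int) : ∀ (xs acc : List Int),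
    xs.foldl (fun vec value => if value ∈ values then vec ++ [1] else vec ++ [0]) acc
      = acc ++ xs.map (fun value => if value ∈ values then (1 : Int) else 0) := by
  intro xs
  induction xs with
  | nil => simp
  | cons x xs ih => intro acc; by_cases h : x ∈ values <;> simp [h, ih]

-- the index-building loop, characterised by getD
theorem mhBuild (ps : List (Int × Int)) : ∀ (d : PySem.Dict Int (List Int)) (v : Int),
    ((ps.foldl (fun d p => d.modify p.2 [] (· ++ [p.1])) d).getD v [])
      = d.getD v [] ++ (ps.filter (fun p => p.2 == v)).map (·.1) := by
  induction ps with
  | nil => simp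
  | cons q ps ih =>
      intro d v
      simp only [List.foldl_cons, ih, List.filter_cons]
      by_cases h : q.2 = v
      · simp [h, PySem.Dict.getD_modify_self]
      · simp [PySem.Dict.getD_modify, h, Ne.symm h]

-- membership in the built index
theorem mhMemIdx (all_values : List Int) (v : Int) (p : Int) :
    p ∈ (((PySem.List.enumerate all_values).foldl
          (fun d q => d.modify q.2 [] (· ++ [q.1])) PySem.Dict.empty).getD v [])
      ↔ ∃ k : Nat, ∃ _h : k < all_values.length, p = (k : Int) ∧ all_values[k] = v := by
  rw [mhBuild]
  simp only [PySem.Dict.getD_empty, List.nil_append, List.mem_map, List.mem_filter]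
  constructor
  · rintro ⟨q, ⟨hq, hv⟩, rfl⟩
    rw [PySem.List.mem_enumerate_iff] at hq
    obtain ⟨k, hk, rfl⟩ := hq
    exact ⟨k, hk, by simpa using hv.symm ▸ rfl, by simpa using (beq_iff_eq.mp hv)⟩
  · rintro ⟨k, hk, rfl, hv⟩
    refine ⟨((k : Int), v), ⟨?_, by simp⟩, rfl⟩
    rw [PySem.List.mem_enumerate_iff]
    exact ⟨k, hk, by simp [hv]⟩

-- the inner marking loop preserves length
theorem mhMarkLen (L : List Int) : ∀ (vec : List Int),
    (L.foldl (fun vec pos => PySem.List.pySetD vec pos 1) vec).length = vec.length := by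
  induction L with
  | nil => simp
  | cons p L ih => intro vec; simp [ih, PySem.List.length_pySetD]

-- the inner marking loop, element-wise (positions are nonnegative)
theorem mhMark (L : List Int) (hL : ∀ p ∈ L, 0 ≤ p) : ∀ (vec : List Int) (j : Nat),
    (L.foldl (fun vec pos => PySem.List.pySetD vec pos 1) vec)[j]?
      = if (j : Int) ∈ L ∧ j < vec.length then some 1 else vec[j]? := by
  induction L with
  | nil => simp
  | cons p L ih =>
      intro vec j
      have hp : 0 ≤ p := hL p (by simp)
      have hL' : ∀ q ∈ L, 0 ≤ q := fun q hq => hL q (by simp [hq])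
      rw [List.foldl_cons, ih hL']
      rw [PySem.List.pySetD_of_nonneg _ _ hp]
      rw [List.length_set, List.getElem?_set]
      by_cases hj : j < vec.length
      · by_cases hmem : (j : Int) ∈ L
        · simp [hmem, hj]
        · by_cases hpj : p = (j : Int)
          · have : p.toNat = j := by omega
            simp [hmem, hj, hpj, this]
          · have hne : p.toNat ≠ j := by omega
            simp [hmem, hj, hne]
            exact fun h => absurd h.symm hpj
      · simp [hj]
        intro h; omega
  
-- the outer loop over values, element-wise
theorem mhOuter (d : PySem.Dict Int (List Int))
    (hd : ∀ v p, p ∈ d.getD v [] → 0 ≤ p) : ∀ (vs : List Int) (vec : List Int) (j : Nat),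
    (vs.foldl (fun vec v => (d.getD v []).foldl (fun vec pos => PySem.List.pySetD vec pos 1) vec) vec)[j]?
      = if (∃ v ∈ vs, (j : Int) ∈ d.getD v []) ∧ j < vec.length then some 1 else vec[j]? := by
  intro vs
  induction vs with
  | nil => simp
  | cons v vs ih =>
      intro vec j
      rw [List.foldl_cons, ih, mhMark _ (hd v), mhMarkLen]
      by_cases hj : j < vec.length
      · by_cases hv : (j : Int) ∈ d.getD v []
        · simp [hv, hj]
        · by_cases hvs : ∃ u ∈ vs, (j : Int) ∈ d.getD u []
          · simp [hv, hj, hvs]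
          · simp [hv, hj, hvs]
      · simp [hj]

-- ===== VERDICT (by name: the statement is the Claim_ definition above) =====
theorem many_hot_encode_spec : Claim_equal_many_hot_encode := by
  intro values all_values _
  unfold Spec_many_hot_encode many_hot_encode many_hot_encode_alt
  set d := (PySem.List.enumerate all_values).foldl
      (fun d q => d.modify q.2 [] (· ++ [q.1])) PySem.Dict.empty with hd_def
  have hd : ∀ v p, p ∈ d.getD v [] → 0 ≤ p := by
    intro v p hp
    rw [hd_def, mhMemIdx] at hp
    obtain ⟨k, _, rfl, _⟩ := hp
    exact Int.natCast_nonneg k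
  rw [mhA_eq_map, List.nil_append]
  apply List.ext_getElem?
  intro j
  rw [mhOuter d hd]
  rw [List.length_replicate]
  by_cases hj : j < all_values.length
  · have hmem : (∃ v ∈ values, (j : Int) ∈ d.getD v []) ↔ all_values[j] ∈ values := by
      constructor
      · rintro ⟨v, hv, hjv⟩
        rw [hd_def, mhMemIdx] at hjv
        obtain ⟨k, hk, hkj, rfl⟩ := hjv
        have : k = j := by omega
        subst this; exact hv
      · intro h
        exact ⟨all_values[j], h, by rw [hd_def, mhMemIdx]; exact ⟨j, hj, rfl, rfl⟩⟩
    by_cases h : all_values[j] ∈ values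
    · simp [hj, hmem, h]
    · simp [hj, hmem, h]
  · have h1 : (all_values.map (fun value => if value ∈ values then (1:Int) else 0))[j]? = none := by
      simp; omega
    have h2 : (List.replicate all_values.length (0:Int))[j]? = none := by
      simp; omega
    simp [hj]
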